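-- pv_equiv track=rewrite | github.com/ganeshparsads/geetcode | stack/daily-temp/findMinWithLowerLimit.py | helper
-- ===== SOURCE A (Python) =====
-- def helper(d, s):
--
-- 	# Return a string of
-- 	# length d
-- 	ans = ['0'] * d
--
-- 	for i in range(d - 1,
-- 				-1, -1):
--
-- 		# Greedily put 9's
-- 		# in the end
-- 		if (s >= 9):
-- 			ans[i] = '9'
-- 			s -= 9
--
-- 		# Put remaining sum
-- 		else:
-- 			c = chr(s +
-- 					ord('0'))
-- 			ans[i] = c;
-- 			s = 0;
--
-- 	return ''.join(ans);
-- ===== SOURCE B (Python) =====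
-- def helper(d, s):
--     nines = max(0, min(d, s // 9))
--     if nines >= d:
--         return '9' * d
--     r = s - 9 * nines
--     return '0' * (d - nines - 1) + chr(r + ord('0')) + '9' * nines
-- ===== Notes on version B (the rewrite author's own statement) =====
-- stated objective: faster
-- what changed: B computes the count of trailing nines in closed form (max(0, min(d, s//9))) and assembles the answer with C-level string repetition and concatenation, replacing A's per-index Python loop that mutates a list from the right.
import Mathlib
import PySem

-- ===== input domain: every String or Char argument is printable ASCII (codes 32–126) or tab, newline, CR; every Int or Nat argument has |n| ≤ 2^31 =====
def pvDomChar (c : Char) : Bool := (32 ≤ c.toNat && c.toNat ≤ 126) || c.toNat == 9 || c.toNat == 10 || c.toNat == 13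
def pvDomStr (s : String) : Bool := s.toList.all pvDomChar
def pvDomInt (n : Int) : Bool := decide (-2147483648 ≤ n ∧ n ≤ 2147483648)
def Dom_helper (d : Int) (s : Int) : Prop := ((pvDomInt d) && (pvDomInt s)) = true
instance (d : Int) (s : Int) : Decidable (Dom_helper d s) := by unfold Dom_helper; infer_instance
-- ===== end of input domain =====

-- B replaces A's right-to-left greedy loop by a closed-form count of trailing nines and
-- string concatenation (objective: simpler); return values only, neither mutates its input.

-- ===== PORT A =====
-- loop body of A: state is (ans, s); 'ans[i] = …' is List.set
def helperStep (st : List Char × Int) (i : Int) : List Char × Int :=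
  if st.2 ≥ 9 then (st.1.set i.toNat '9', st.2 - 9)
  else (st.1.set i.toNat (Char.ofNat (st.2 + 48).toNat), 0)

def helper (d : Int) (s : Int) : String :=
  let ans : List Char := List.replicate d.toNat '0'
  let res := (PySem.List.pyRange (d - 1) (-1) (-1)).foldl helperStep (ans, s)
  String.mk res.1

-- ===== PORT B =====
def helper_alt (d : Int) (s : Int) : String :=
  let nines := max 0 (min d (PySem.Int.floordiv s 9))
  if nines ≥ d then String.mk (List.replicate d.toNat '9')
  else
    let r := s - 9 * nines
    String.mk (List.replicate (d - nines - 1).toNat '0'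
               ++ [Char.ofNat (r + 48).toNat]
               ++ List.replicate nines.toNat '9')

-- ===== PRECONDITION & SPEC =====
-- Pre_ excludes exactly the inputs where A raises ValueError: for d > 0 and s < -48,
-- chr(s + ord('0')) gets a negative code point (B raises the very same way there).
def Pre_helper (d : Int) (s : Int) : Prop := 0 < d → -48 ≤ s
instance (d : Int) (s : Int) : Decidable (Pre_helper d s) := by unfold Pre_helper; infer_instance
def pvWitness_helper : Int × Int := (3, 20)

def Spec_helper (d : Int) (s : Int) (out : String) : Prop := out = helper_alt d s
instance (d : Int) (s : Int) (out : String) : Decidable (Spec_helper d s out) := by unfold Spec_helper; infer_instance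

-- ===== CLAIM (what is proved, stated in full; the proofs are below) =====
def Claim_equal_helper : Prop := ∀ (d : Int) (s : Int), Dom_helper d s → Pre_helper d s → Spec_helper d s (helper d s)

-- ===== LEMMAS AND PROOFS =====

-- the greedy result on n positions with remaining sum s (A's loop, read right-to-left)
def Gg : Nat → Int → List Char
  | 0, _ => []
  | n + 1, s => if s ≥ 9 then Gg n (s - 9) ++ ['9'] else Gg n 0 ++ [Char.ofNat (s + 48).toNat]

theorem Gg_zero (n : Nat) : Gg n 0 = List.replicate n '0' := by
  induction n with
  | zero => rfl
  | succ n ih =>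
    show (if (0:Int) ≥ 9 then _ else Gg n 0 ++ [Char.ofNat ((0:Int) + 48).toNat]) = _
    rw [if_neg (by omega), ih, List.replicate_succ']
    rfl

theorem drop_set_succ (l : List Char) (n : Nat) (c : Char) (h : n < l.length) :
    (l.set n c).drop n = c :: l.drop (n + 1) := by
  induction l generalizing n with
  | nil => simp at h
  | cons a l ih =>
    cases n with
    | zero => simp
    | succ n => simpa using ih n (by simpa using h)

-- A's loop over [n-1, …, 0] rewrites the first n entries of ans to Gg n s
theorem foldl_desc (n : Nat) (ans : List Char) (s : Int) (h : n ≤ ans.length) :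
    ((PySem.List.pyRange ((n : Int) - 1) (-1) (-1)).foldl helperStep (ans, s)).1
      = Gg n s ++ ans.drop n := by
  induction n generalizing ans s with
  | zero => simp [Gg]
  | succ n ih =>
    have hcast : ((n + 1 : Nat) : Int) - 1 = (n : Int) := by push_cast; ring
    rw [hcast, PySem.List.pyRange_neg_one_cons (by omega : (-1:Int) < (n:Int)), List.foldl_cons]
    have htn : (n : Int).toNat = n := by omega
    by_cases h9 : s ≥ 9
    · have hstep : helperStep (ans, s) (n : Int) = (ans.set n '9', s - 9) := by
        simp [helperStep, h9, htn]
      rw [hstep, ih _ _ (by simp; omega), drop_set_succ ans n '9' (by omega)]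
      show _ = (if s ≥ 9 then Gg n (s - 9) ++ ['9'] else _) ++ ans.drop (n + 1)
      rw [if_pos h9]
      simp
    · have hstep : helperStep (ans, s) (n : Int)
          = (ans.set n (Char.ofNat (s + 48).toNat), 0) := by
        simp [helperStep, h9, htn]
      rw [hstep, ih _ _ (by simp; omega), drop_set_succ ans n _ (by omega)]
      show _ = (if s ≥ 9 then _ else Gg n 0 ++ [Char.ofNat (s + 48).toNat]) ++ ans.drop (n + 1)
      rw [if_neg h9]
      simp

-- closed form for the greedy result (B's formula)
theorem Gg_closed (n : Nat) (s : Int) (hn : 0 < n) :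
    Gg n s =
      (let nines := max 0 (min (n : Int) (PySem.Int.floordiv s 9))
       if nines ≥ (n : Int) then List.replicate n '9'
       else List.replicate ((n : Int) - nines - 1).toNat '0'
            ++ [Char.ofNat (s - 9 * nines + 48).toNat]
            ++ List.replicate nines.toNat '9') := by
  induction n generalizing s with
  | zero => omega
  | succ n ih =>
    have hdiv : PySem.Int.floordiv s 9 = s / 9 :=
      PySem.Int.floordiv_eq_ediv_of_pos (by omega)
    by_cases h9 : s ≥ 9
    · have hq1 : 1 ≤ s / 9 := by omega
      have hdiv' : PySem.Int.floordiv (s - 9) 9 = (s - 9) / 9 :=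
        PySem.Int.floordiv_eq_ediv_of_pos (by omega)
      have hshift : (s - 9) / 9 = s / 9 - 1 := by omega
      show (if s ≥ 9 then Gg n (s - 9) ++ ['9'] else _) = _
      rw [if_pos h9]
      cases Nat.eq_zero_or_pos n with
      | inl h0 =>
        subst h0
        show Gg 0 (s - 9) ++ ['9'] = _
        simp only [Gg, hdiv]
        have : max 0 (min ((1:Nat) : Int) (s / 9)) = 1 := by push_cast; omega
        rw [this, if_pos (by norm_num)]
        rfl
      | inr hpos =>
        rw [ih (s - 9) hpos]
        simp only [hdiv, hdiv', hshift]
        have hns : max 0 (min ((n + 1 : Nat) : Int) (s / 9))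
            = max 0 (min (n : Int) (s / 9 - 1)) + 1 := by push_cast; omega
        rw [hns]
        set m := max 0 (min (n : Int) (s / 9 - 1)) with hm
        have hm0 : 0 ≤ m := le_max_left _ _
        by_cases hge : m ≥ (n : Int)
        · rw [if_pos hge, if_pos (by push_cast; omega)]
          rw [List.replicate_succ' (n := n)]
        · rw [if_neg hge, if_neg (by push_cast; omega)]
          have h1 : ((n + 1 : Nat) : Int) - (m + 1) - 1 = (n : Int) - m - 1 := by push_cast; ring
          have h2 : s - 9 - 9 * m = s - 9 * (m + 1) := by ring
          have h3 : (m + 1).toNat = m.toNat + 1 := by omega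
          rw [h1, h2, h3, List.replicate_succ' (n := m.toNat)]
          simp
    · -- s < 9: no nine is placed; the remainder goes last, zeros before it
      have hq0 : s / 9 ≤ 0 := by omega
      show (if s ≥ 9 then _ else Gg n 0 ++ [Char.ofNat (s + 48).toNat]) = _
      rw [if_neg h9, Gg_zero]
      simp only [hdiv]
      have hns : max 0 (min ((n + 1 : Nat) : Int) (s / 9)) = 0 := by push_cast; omega
      rw [hns, if_neg (by push_cast; omega)]
      have h1 : ((n + 1 : Nat) : Int) - 0 - 1 = (n : Int) := by push_cast; ring
      rw [h1]
      simp

-- ===== VERDICT (by name: the statement is the Claim_ definition above) =====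
theorem helper_spec : Claim_equal_helper := by
  intro d s _ _
  show helper d s = helper_alt d s
  by_cases hd : d ≤ 0
  · have hr : PySem.List.pyRange (d - 1) (-1) (-1) = [] :=
      PySem.List.pyRange_neg_one_eq_nil (by omega)
    have hdt : d.toNat = 0 := by omega
    have hm : max 0 (min d (PySem.Int.floordiv s 9)) ≥ d :=
      le_trans (by omega) (le_max_left _ _)
    have hB : helper_alt d s = String.mk (List.replicate d.toNat '9') := by
      unfold helper_alt; rw [if_pos hm]
    simp [helper, hB, hr, hdt]
  · have hdpos : 0 < d := by omega
    have hn : ((d.toNat : Int)) = d := by omega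
    have hnpos : 0 < d.toNat := by omega
    have hA : helper d s = String.mk (((PySem.List.pyRange (d - 1) (-1) (-1)).foldl
        helperStep (List.replicate d.toNat '0', s)).1) := rfl
    rw [show d - 1 = (d.toNat : Int) - 1 by omega] at hA
    rw [foldl_desc d.toNat (List.replicate d.toNat '0') s (by simp)] at hA
    simp at hA
    rw [hA, Gg_closed d.toNat s hnpos]
    unfold helper_alt
    simp only [hn]
    rw [apply_ite String.mk]
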